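-- pv_equiv track=rewrite | github.com/studying-ice-bear/pparkkkimeom | ParkJeongYoon/DataStructure/5397_키로거.py | find_password2
-- ===== SOURCE A (Python) =====
-- def find_password2(input_password):
--     left = []
--     right = []
--
--     for word in input_password:
--         if word == "<":
--             if left:
--                 temp = left.pop()
--                 right.append(temp)
--         elif word == ">":
--             if right:
--                 temp = right.pop()
--                 left.append(temp)
--         elif word == "-":
--             if left:
--                 left.pop()
--         else:
--             left.append(word)
--
--     right.reverse()
--     answer = left + right
--     return ''.join(answer)
-- ===== SOURCE B (Python) =====
-- def find_password2(input_password):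
--     result = []
--     pos = 0
--     for word in input_password:
--         if word == "<":
--             if pos > 0:
--                 pos -= 1
--         elif word == ">":
--             if pos < len(result):
--                 pos += 1
--         elif word == "-":
--             if pos > 0:
--                 del result[pos - 1]
--                 pos -= 1
--         else:
--             result.insert(pos, word)
--             pos += 1
--     return ''.join(result)
-- ===== Notes on version B (the rewrite author's own statement) =====
-- stated objective: alternative
-- what changed: Replaces the two-stack left/right representation (with a final reverse and concatenation) by a single cursor-indexed list with insert/delete at the cursor position, so the text is maintained as one buffer and no reverse step is needed.
import Mathlib
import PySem

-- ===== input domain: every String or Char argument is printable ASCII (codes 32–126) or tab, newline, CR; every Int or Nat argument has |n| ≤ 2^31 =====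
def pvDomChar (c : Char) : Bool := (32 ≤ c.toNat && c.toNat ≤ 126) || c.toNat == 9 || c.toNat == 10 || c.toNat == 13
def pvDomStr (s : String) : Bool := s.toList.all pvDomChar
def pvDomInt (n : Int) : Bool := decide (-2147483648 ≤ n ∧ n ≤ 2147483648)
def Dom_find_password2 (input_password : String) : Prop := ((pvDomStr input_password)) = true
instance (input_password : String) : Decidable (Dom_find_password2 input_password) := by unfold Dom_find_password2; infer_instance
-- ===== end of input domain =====

-- B replaces A's two stacks (plus final reverse+concat) by a single cursor-indexed buffer; alternative structure, same output.

-- ===== PORT A =====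
-- stacks are Lean lists with the TOP at the head (push = cons, pop = uncons),
-- so Python's `left` list is `left.reverse` and Python's `right` list is `right.reverse`
def pvAStep (st : List Char × List Char) (word : Char) : List Char × List Char :=
  let left := st.1
  let right := st.2
  if word = '<' then
    match left with
    | [] => (left, right)
    | t :: l => (l, t :: right)
  else if word = '>' then
    match right with
    | [] => (left, right)
    | t :: r => (t :: left, r)
  else if word = '-' then
    match left with
    | [] => (left, right)
    | _ :: l => (l, right)
  else (word :: left, right)

def find_password2 (input_password : String) : String :=
  let st := input_password.toList.foldl pvAStep ([], [])
  -- Python: right.reverse(); ''.join(left + right) = left.reverse ++ right here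
  String.mk (st.1.reverse ++ st.2)

-- ===== PORT B =====
def pvBStep (st : List Char × Nat) (word : Char) : List Char × Nat :=
  let result := st.1
  let pos := st.2
  if word = '<' then
    if pos > 0 then (result, pos - 1) else (result, pos)
  else if word = '>' then
    if pos < result.length then (result, pos + 1) else (result, pos)
  else if word = '-' then
    if pos > 0 then (result.eraseIdx (pos - 1), pos - 1) else (result, pos)
  else (result.insertIdx pos word, pos + 1)

def find_password2_alt (input_password : String) : String :=
  let st := input_password.toList.foldl pvBStep ([], 0)
  String.mk st.1

-- ===== PRECONDITION & SPEC =====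
def Spec_find_password2 (input_password : String) (out : String) : Prop := out = find_password2_alt input_password
instance (input_password : String) (out : String) : Decidable (Spec_find_password2 input_password out) := by unfold Spec_find_password2; infer_instance

-- ===== CLAIM (what is proved, stated in full; the proofs are below) =====
def Claim_equal_find_password2 : Prop := ∀ (input_password : String), Dom_find_password2 input_password → Spec_find_password2 input_password (find_password2 input_password)

-- ===== LEMMAS AND PROOFS =====

theorem pvInsertIdx_at_length {α : Type} (xs ys : List α) (a : α) :
    (xs ++ ys).insertIdx xs.length a = xs ++ a :: ys := by
  induction xs with
  | nil => simp
  | cons x xs ih => simpa [List.insertIdx] using ih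

theorem pvEraseIdx_at_length {α : Type} (xs ys : List α) (y : α) :
    (xs ++ y :: ys).eraseIdx xs.length = xs ++ ys := by
  induction xs with
  | nil => simp
  | cons x xs ih => simpa [List.eraseIdx] using ih

theorem pvInsertIdx_rev {α : Type} (xs ys : List α) (a : α) :
    (xs.reverse ++ ys).insertIdx xs.length a = xs.reverse ++ a :: ys := by
  simpa using pvInsertIdx_at_length xs.reverse ys a

theorem pvEraseIdx_rev {α : Type} (xs ys : List α) (y : α) :
    (xs.reverse ++ y :: ys).eraseIdx xs.length = xs.reverse ++ ys := by
  simpa using pvEraseIdx_at_length xs.reverse ys y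

-- the coupling invariant: B's buffer is A's left (reversed) followed by A's right, cursor = |left|
def pvInv (a : List Char × List Char) (b : List Char × Nat) : Prop :=
  b.1 = a.1.reverse ++ a.2 ∧ b.2 = a.1.length

theorem pvStep_inv (a : List Char × List Char) (b : List Char × Nat) (w : Char)
    (h : pvInv a b) : pvInv (pvAStep a w) (pvBStep b w) := by
  obtain ⟨left, right⟩ := a
  obtain ⟨res, pos⟩ := b
  obtain ⟨h1, h2⟩ := h
  simp only [pvInv] at *
  subst h1 h2
  by_cases hlt : w = '<'
  · cases left <;> simp [pvAStep, pvBStep, hlt]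
  · by_cases hgt : w = '>'
    · cases right with
      | nil => simp [pvAStep, pvBStep, hlt, hgt]
      | cons t r =>
        have hpos : left.length < (left.reverse ++ t :: r).length := by simp
        refine ⟨?_, ?_⟩ <;>
          simp [pvAStep, pvBStep, hlt, hgt, hpos]
    · by_cases hmin : w = '-'
      · cases left with
        | nil => simp [pvAStep, pvBStep, hlt, hgt, hmin]
        | cons t l =>
          refine ⟨?_, ?_⟩ <;>
            simp [pvAStep, pvBStep, hlt, hgt, hmin, pvEraseIdx_rev l right t]
      · refine ⟨?_, ?_⟩ <;>
          simp [pvAStep, pvBStep, hlt, hgt, hmin,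
            pvInsertIdx_rev left right w]

theorem pvFold_inv (ws : List Char) (a : List Char × List Char) (b : List Char × Nat)
    (h : pvInv a b) : pvInv (ws.foldl pvAStep a) (ws.foldl pvBStep b) := by
  induction ws generalizing a b with
  | nil => exact h
  | cons w ws ih => exact ih _ _ (pvStep_inv a b w h)

-- ===== VERDICT (by name: the statement is the Claim_ definition above) =====
theorem find_password2_spec : Claim_equal_find_password2 := by
  intro s _
  unfold Spec_find_password2
  have h := pvFold_inv s.toList ([], []) ([], 0) (by simp [pvInv])
  simp only [find_password2, find_password2_alt]
  rw [h.1]
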